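-- pv_equiv track=rewrite | github.com/Emillock/wordle567-solver | main2.py | update_csp_domains
-- ===== SOURCE A (Python) =====
-- from typing import List, Dict, Tuple
--
-- def update_csp_domains(allowed_letters: List[List[str]], guess: str, feedback: List[str]) -> Tuple[List[List[str]], Dict[str, int]]:
--     """
--     Updates the CSP domains (allowed_letters) based on the generate_wordle_feedback output.
--
--     Args:
--         allowed_letters: The current list of 5 domains (one for each position).
--         guess: The word that was just guessed.
--         feedback: The list of 'GREEN', 'YELLOW', 'GRAY' results.
--     """
--
--     #Dictionary to track the minimum required count of each letter
--     #This must be calculated fresh for each guess, based on the current feedback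
--     must_contain_counts = {}
--
--     #1) First Pass: Calculate all required GREEN and YELLOW counts
--     for i in range(5):
--         letter = guess[i]
--
--         #We only care about letters that are definitely in the word
--         if feedback[i] in ['GREEN', 'YELLOW']:
--             #Sum up all GREEN/YELLOW instances of the letter in the guess
--             total_yellow_or_green = sum(1 for k in range(5) if guess[k] == letter and feedback[k] in ['GREEN', 'YELLOW'])
--
--             #The 'must_contain' count is the max of the current count and this total
--             must_contain_counts[letter] = max(must_contain_counts.get(letter, 0), total_yellow_or_green)
--
--
--     #2) Second Pass: Apply Positional and Omission Constraints
--     for i in range(5):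
--         letter = guess[i]
--
--         if feedback[i] == 'GREEN':
--             #Positional Constraint: Fixed to this letter
--             allowed_letters[i] = [letter]
--
--         elif feedback[i] == 'YELLOW':
--             #Positional Exclusion: Remove the letter from the current position's domain
--             if letter in allowed_letters[i]:
--                 allowed_letters[i].remove(letter)
--
--         elif feedback[i] == 'GRAY':
--             #Omission Rule: A letter is GRAY and must be omitted if, and only if, its required count is zero
--
--             #This check uses .get(letter, 0) to safely check if the letter is in the dictionary.
--             is_required_elsewhere = must_contain_counts.get(letter, 0) > 0
--
--             if not is_required_elsewhere:
--                 #If not required, remove this letter from all 5 domains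
--                 for j in range(5):
--                     if letter in allowed_letters[j]:
--                         allowed_letters[j].remove(letter)
--
--     return allowed_letters, must_contain_counts
-- ===== SOURCE B (Python) =====
-- # Simpler decomposition: count the GREEN/YELLOW letters once, derive the set of letters
-- # ruled out by GRAY feedback, then rebuild the five position domains in one filtering sweep.
-- # A mutates allowed_letters in place; this version builds fresh domain lists (same return value).
-- def update_csp_domains(allowed_letters, guess, feedback):
--     must_contain_counts = {}
--     for i in range(5):
--         if feedback[i] in ('GREEN', 'YELLOW'):
--             must_contain_counts[guess[i]] = must_contain_counts.get(guess[i], 0) + 1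
--
--     forbidden = {guess[i] for i in range(5)
--                  if feedback[i] == 'GRAY' and guess[i] not in must_contain_counts}
--
--     result = list(allowed_letters)
--     for i in range(5):
--         if feedback[i] == 'GREEN':
--             result[i] = [guess[i]]
--         else:
--             banned = forbidden | {guess[i]} if feedback[i] == 'YELLOW' else forbidden
--             result[i] = [x for x in result[i] if x not in banned]
--     return result, must_contain_counts
-- ===== Notes on version B (the rewrite author's own statement) =====
-- stated objective: simpler
-- what changed: B counts GREEN/YELLOW letters in one pass instead of A's max-of-recomputed-sums, precomputes the set of letters ruled out by GRAY feedback, and rebuilds each position's domain with a single membership filter, replacing A's nested per-GRAY-position removal loop over all five domains; Pre_ restricts to the function's natural domain (at least 5 position domains for the 5-letter guess/feedback) and excludes domain lists with duplicate letters, on which A's remove-one-occurrence-per-GRAY-position behaviour is an accident of representing a letter set as a list; …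
-- outside the precondition, e.g. on update_csp_domains([], 'abcde', ['x', 'x', 'x', 'x', 'x']): A returns ([], {}), B raises IndexError
import Mathlib
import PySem

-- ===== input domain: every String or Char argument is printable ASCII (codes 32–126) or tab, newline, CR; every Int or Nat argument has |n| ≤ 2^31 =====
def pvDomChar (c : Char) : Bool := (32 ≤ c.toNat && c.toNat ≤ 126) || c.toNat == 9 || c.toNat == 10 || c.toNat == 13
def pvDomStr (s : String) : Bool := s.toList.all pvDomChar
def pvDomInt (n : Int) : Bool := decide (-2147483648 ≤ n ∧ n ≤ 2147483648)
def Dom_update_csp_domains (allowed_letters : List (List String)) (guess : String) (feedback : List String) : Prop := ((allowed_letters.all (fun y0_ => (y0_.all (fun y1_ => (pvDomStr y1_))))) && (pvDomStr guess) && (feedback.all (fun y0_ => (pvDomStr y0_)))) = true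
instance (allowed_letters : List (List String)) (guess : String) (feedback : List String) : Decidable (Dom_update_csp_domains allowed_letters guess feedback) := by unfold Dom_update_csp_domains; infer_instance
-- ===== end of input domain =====

-- B counts GREEN/YELLOW letters once, builds the set of GRAY-forbidden letters, and rebuilds
-- each position's domain with one membership filter (objective: simpler decomposition).
-- Python A mutates allowed_letters in place; B builds fresh lists — the equivalence here is
-- about the RETURN value only.

-- shared helpers: guess[i] (a one-char string) and feedback[i], totalized (none cases excluded by Pre_)
def pvLetter (guess : String) (i : Int) : String :=
  match PySem.Str.pyGet? guess i with
  | some c => String.ofList [c]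
  | none => ""

def pvFB (feedback : List String) (i : Int) : String :=
  (PySem.List.pyGet? feedback i).getD ""

-- ===== PORT A =====
def update_csp_domains (allowed_letters : List (List String)) (guess : String) (feedback : List String) : List (List String) × (List (String × Int)) :=
  let must := (PySem.List.pyRange 0 5).foldl (fun d i =>
      let letter := pvLetter guess i
      if pvFB feedback i = "GREEN" ∨ pvFB feedback i = "YELLOW" then
        let total : Int := ((PySem.List.pyRange 0 5).map (fun k =>
            if pvLetter guess k = letter ∧ (pvFB feedback k = "GREEN" ∨ pvFB feedback k = "YELLOW") then (1 : Int) else 0)).sum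
        d.insert letter (max (d.getD letter 0) total)
      else d) PySem.Dict.empty
  let st := (PySem.List.pyRange 0 5).foldl (fun st i =>
      let letter := pvLetter guess i
      if pvFB feedback i = "GREEN" then
        PySem.List.pySetD st i [letter]
      else if pvFB feedback i = "YELLOW" then
        let dom := (PySem.List.pyGet? st i).getD []
        if letter ∈ dom then PySem.List.pySetD st i ((PySem.List.remove? dom letter).getD dom) else st
      else if pvFB feedback i = "GRAY" then
        if ¬ (must.getD letter 0 > 0) then
          (PySem.List.pyRange 0 5).foldl (fun st2 j =>
            let domj := (PySem.List.pyGet? st2 j).getD []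
            if letter ∈ domj then PySem.List.pySetD st2 j ((PySem.List.remove? domj letter).getD domj) else st2) st
        else st
      else st) allowed_letters
  (st, must.items)

-- ===== PORT B =====
def update_csp_domains_alt (allowed_letters : List (List String)) (guess : String) (feedback : List String) : List (List String) × (List (String × Int)) :=
  let must := (PySem.List.pyRange 0 5).foldl (fun d i =>
      if pvFB feedback i = "GREEN" ∨ pvFB feedback i = "YELLOW" then
        d.insert (pvLetter guess i) (d.getD (pvLetter guess i) 0 + 1)
      else d) PySem.Dict.empty
  let forbidden : PySem.Set String := (PySem.List.pyRange 0 5).foldl (fun s i =>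
      if pvFB feedback i = "GRAY" ∧ ¬ must.contains (pvLetter guess i) = true then
        PySem.Set.add s (pvLetter guess i)
      else s) PySem.Set.empty
  let result := (PySem.List.pyRange 0 5).foldl (fun st i =>
      if pvFB feedback i = "GREEN" then
        PySem.List.pySetD st i [pvLetter guess i]
      else
        let banned : PySem.Set String :=
          if pvFB feedback i = "YELLOW" then PySem.Set.union forbidden [pvLetter guess i] else forbidden
        PySem.List.pySetD st i
          (((PySem.List.pyGet? st i).getD []).filter (fun x => !(PySem.Set.contains banned x)))) allowed_letters
  (result, must.items)

-- ===== PRECONDITION & SPEC =====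
-- Pre_ restricts to the function's natural domain (per the docstring: 5 position domains for a
-- 5-letter guess and feedback; extra trailing domains are harmless and admitted) and excludes
-- domain lists with duplicate letters, on which A's remove-one-occurrence-per-GRAY-position
-- list.remove behaviour is an accident of representing a letter set as a list.
def Pre_update_csp_domains (allowed_letters : List (List String)) (guess : String) (feedback : List String) : Prop :=
  5 ≤ guess.toList.length ∧ 5 ≤ feedback.length ∧ 5 ≤ allowed_letters.length ∧
  ∀ i : Nat, i < 5 → ((allowed_letters[i]?).getD []).Nodup

instance (allowed_letters : List (List String)) (guess : String) (feedback : List String) : Decidable (Pre_update_csp_domains allowed_letters guess feedback) := by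
  unfold Pre_update_csp_domains; infer_instance

def pvWitness_update_csp_domains : List (List String) × String × List String :=
  ([["a","b","c"],["a","b"],["c","d"],["a","c"],["b","d"]], "abcde",
   ["GREEN","YELLOW","GRAY","GRAY","other"])

def Spec_update_csp_domains (allowed_letters : List (List String)) (guess : String) (feedback : List String) (out : List (List String) × (List (String × Int))) : Prop := out = update_csp_domains_alt allowed_letters guess feedback
instance (allowed_letters : List (List String)) (guess : String) (feedback : List String) (out : List (List String) × (List (String × Int))) : Decidable (Spec_update_csp_domains allowed_letters guess feedback out) := by unfold Spec_update_csp_domains; infer_instance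

-- ===== CLAIM (what is proved, stated in full; the proofs are below) =====
def Claim_equal_update_csp_domains : Prop := ∀ (allowed_letters : List (List String)) (guess : String) (feedback : List String), Dom_update_csp_domains allowed_letters guess feedback → Pre_update_csp_domains allowed_letters guess feedback → Spec_update_csp_domains allowed_letters guess feedback (update_csp_domains allowed_letters guess feedback)

-- ===== LEMMAS AND PROOFS =====

def pvEff (f : List String) (i : Int) : Bool := decide (pvFB f i = "GREEN" ∨ pvFB f i = "YELLOW")
def pvEffLs (g : String) (f : List String) : List String :=
  ((PySem.List.pyRange 0 5).filter (pvEff f)).map (pvLetter g)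

lemma pvFoldMaxItems (C : String → Int) (hC : ∀ x, 0 ≤ C x) (ls : List String) :
    (ls.foldl (fun d x => d.insert x (max (d.getD x 0) (C x))) PySem.Dict.empty).items
      = (PySem.Set.ofList ls).map (fun k => (k, C k)) := by
  induction ls using List.reverseRecOn with
  | nil => rfl
  | append_singleton xs x ih =>
    rw [List.foldl_append, List.foldl_cons, List.foldl_nil]
    set d := xs.foldl (fun d x => d.insert x (max (d.getD x 0) (C x))) PySem.Dict.empty with hd
    have hkeys : d.keys = PySem.Set.ofList xs := by
      simp only [PySem.Dict.keys, ih, List.map_map]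
      exact List.map_id' _
    have hnodup : d.keys.Nodup := by rw [hkeys]; exact PySem.Set.nodup_ofList xs
    by_cases hx : x ∈ xs
    · have hmemS : x ∈ PySem.Set.ofList xs := (PySem.Set.mem_ofList _ _).2 hx
      have hmem : (x, C x) ∈ d.items := by rw [ih]; exact List.mem_map_of_mem hmemS
      have hget : d.getD x 0 = C x := PySem.Dict.getD_of_mem_items d hmem hnodup 0
      have hcont : d.contains x = true := by
        rw [PySem.Dict.contains_iff_mem_keys, hkeys]; exact hmemS
      rw [hget, max_self, PySem.Dict.items_insert_of_contains d _ hcont, ih,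
        PySem.Set.ofList_append_singleton, PySem.Set.add_of_mem hmemS, List.map_map]
      apply List.map_congr_left
      intro k hk
      by_cases hkx : k = x
      · simp [hkx]
      · simp [Function.comp, hkx]
    · have hmemS : x ∉ PySem.Set.ofList xs := fun h => hx ((PySem.Set.mem_ofList _ _).1 h)
      have hcont : d.contains x = false := by
        rw [← Bool.not_eq_true, PySem.Dict.contains_iff_mem_keys, hkeys]; exact hmemS
      have hget : d.getD x 0 = 0 := PySem.Dict.getD_of_not_contains d 0 hcont
      rw [hget, max_eq_right (hC x), PySem.Dict.items_insert_of_not_contains d _ hcont, ih,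
        PySem.Set.ofList_append_singleton, PySem.Set.add_of_not_mem hmemS, List.map_append, List.map_singleton]

def pvStepA1 (g : String) (f : List String) : PySem.Dict String Int → Int → PySem.Dict String Int :=
  fun d i =>
    let letter := pvLetter g i
    if pvFB f i = "GREEN" ∨ pvFB f i = "YELLOW" then
      let total : Int := ((PySem.List.pyRange 0 5).map (fun k =>
          if pvLetter g k = letter ∧ (pvFB f k = "GREEN" ∨ pvFB f k = "YELLOW") then (1 : Int) else 0)).sum
      d.insert letter (max (d.getD letter 0) total)
    else d
def pvMustA (g : String) (f : List String) : PySem.Dict String Int :=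
  (PySem.List.pyRange 0 5).foldl (pvStepA1 g f) PySem.Dict.empty
def pvMustB (g : String) (f : List String) : PySem.Dict String Int :=
  (PySem.List.pyRange 0 5).foldl (fun d i =>
    if pvFB f i = "GREEN" ∨ pvFB f i = "YELLOW" then
      d.insert (pvLetter g i) (d.getD (pvLetter g i) 0 + 1)
    else d) PySem.Dict.empty
lemma pvTval (g : String) (f : List String) (x : String) :
    ((PySem.List.pyRange 0 5).map (fun k =>
        if pvLetter g k = x ∧ (pvFB f k = "GREEN" ∨ pvFB f k = "YELLOW") then (1 : Int) else 0)).sum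
      = ((pvEffLs g f).count x : Int) := by
  have h1 : ((PySem.List.pyRange 0 5).map (fun k =>
        if pvLetter g k = x ∧ (pvFB f k = "GREEN" ∨ pvFB f k = "YELLOW") then (1 : Int) else 0)).sum
      = ((PySem.List.pyRange 0 5).countP (fun k => decide (pvLetter g k = x) && pvEff f k) : Int) := by
    rw [← PySem.List.sum_map_ite_one_zero]
    congr 1
    apply List.map_congr_left
    intro k _
    simp [pvEff]
  rw [h1]
  congr 1
  rw [pvEffLs, List.count_eq_countP, List.countP_map, List.countP_filter]
  apply List.countP_congr
  intro k _
  simp only [Function.comp]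
  rw [Bool.beq_eq_decide_eq]

lemma pvMustA_eq (g : String) (f : List String) :
    pvMustA g f = PySem.Dict.counter (pvEffLs g f) := by
  have hstep : pvStepA1 g f = fun d i =>
      if pvEff f i = true then
        d.insert (pvLetter g i) (max (d.getD (pvLetter g i) 0) ((pvEffLs g f).count (pvLetter g i) : Int))
      else d := by
    funext d i
    simp only [pvStepA1, pvTval, pvEff, decide_eq_true_eq]
  apply PySem.Dict.ext
  rw [PySem.Dict.items_counter, pvMustA, hstep, ← List.foldl_filter,
    ← pvFoldMaxItems (fun x => ((pvEffLs g f).count x : Int)) (fun x => Int.natCast_nonneg _) (pvEffLs g f)]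
  rw [pvEffLs, List.foldl_map]

lemma pvMustB_eq (g : String) (f : List String) :
    pvMustB g f = PySem.Dict.counter (pvEffLs g f) := by
  have hstep : (fun (d : PySem.Dict String Int) (i : Int) =>
      if pvFB f i = "GREEN" ∨ pvFB f i = "YELLOW" then
        d.insert (pvLetter g i) (d.getD (pvLetter g i) 0 + 1)
      else d) = fun d i =>
      if pvEff f i = true then d.insert (pvLetter g i) (d.getD (pvLetter g i) 0 + 1) else d := by
    funext d i
    simp only [pvEff, decide_eq_true_eq]
  rw [pvMustB, hstep, ← List.foldl_filter,
    ← PySem.Dict.foldl_insert_getD_add_one_eq_counter (pvEffLs g f), pvEffLs, List.foldl_map]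

def pvGrayB (g : String) (f : List String) (i : Int) : Bool :=
  decide (pvFB f i = "GRAY" ∧ pvLetter g i ∉ pvEffLs g f)
def pvGrays (g : String) (f : List String) : List String :=
  ((PySem.List.pyRange 0 5).filter (pvGrayB g f)).map (pvLetter g)
def pvEraseList (d : List String) (ws : List String) : List String := ws.foldl List.erase d

-- the GRAY-forbidden set built by B
def pvForbS (g : String) (f : List String) : PySem.Set String :=
  (PySem.List.pyRange 0 5).foldl (fun s i =>
    if pvFB f i = "GRAY" ∧ ¬ (pvMustB g f).contains (pvLetter g i) = true then
      PySem.Set.add s (pvLetter g i)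
    else s) PySem.Set.empty

lemma pvForbS_eq (g : String) (f : List String) :
    pvForbS g f = PySem.Set.ofList (pvGrays g f) := by
  have hstep : (fun (s : PySem.Set String) (i : Int) =>
      if pvFB f i = "GRAY" ∧ ¬ (pvMustB g f).contains (pvLetter g i) = true then
        PySem.Set.add s (pvLetter g i)
      else s) = fun s i =>
      if pvGrayB g f i = true then PySem.Set.add s (pvLetter g i) else s := by
    funext s i
    have hc : (pvMustB g f).contains (pvLetter g i) = (pvEffLs g f).contains (pvLetter g i) := by
      rw [pvMustB_eq, PySem.Dict.contains_counter]
    simp only [pvGrayB, decide_eq_true_eq, hc, List.contains_iff_mem, decide_eq_true_eq]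
  rw [pvForbS, hstep, ← List.foldl_filter, pvGrays, PySem.Set.ofList_eq_foldl, List.foldl_map]
  rfl

lemma pvMem_effLs (g : String) (f : List String) (x : String) :
    x ∈ pvEffLs g f ↔ ∃ k : Nat, k < 5 ∧ pvLetter g k = x ∧ (pvFB f k = "GREEN" ∨ pvFB f k = "YELLOW") := by
  rw [pvEffLs]
  simp only [List.mem_map, List.mem_filter, PySem.List.mem_pyRange_one, pvEff, decide_eq_true_eq]
  constructor
  · rintro ⟨k, ⟨⟨hk0, hk5⟩, heff⟩, hlet⟩
    exact ⟨k.toNat, by omega, by rwa [Int.toNat_of_nonneg hk0], by rwa [Int.toNat_of_nonneg hk0]⟩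
  · rintro ⟨k, hk5, hlet, heff⟩
    exact ⟨(k : Int), ⟨⟨by positivity, by exact_mod_cast hk5⟩, heff⟩, hlet⟩

def pvInner (letter : String) : List (List String) → Int → List (List String) :=
  fun st2 j =>
    let domj := (PySem.List.pyGet? st2 j).getD []
    if letter ∈ domj then PySem.List.pySetD st2 j ((PySem.List.remove? domj letter).getD domj) else st2

lemma pvInner_step (letter : String) (st : List (List String)) (m : Nat) (hm : m < st.length) :
    pvInner letter st (m : Int) = st.set m (st[m].erase letter) := by
  rw [pvInner]
  simp only [PySem.List.pyGet?_natCast, List.getElem?_eq_getElem hm, Option.getD_some]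
  by_cases hmem : letter ∈ st[m]
  · rw [if_pos hmem, PySem.List.remove?_eq_some_erase _ _ hmem, Option.getD_some,
      PySem.List.pySetD, PySem.List.pySet?_natCast _ _ _ hm, Option.getD_some]
  · rw [if_neg hmem, List.erase_of_not_mem hmem, List.set_getElem_self]

lemma pvGrayInner (letter : String) (m : Nat) (hm : m ≤ 5) (st : List (List String)) (h5 : 5 ≤ st.length) :
    ((PySem.List.pyRange 0 (m : Int)).foldl (pvInner letter) st).length = st.length ∧
    ∀ j : Nat, ((PySem.List.pyRange 0 (m : Int)).foldl (pvInner letter) st)[j]?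
      = if j < m then (st[j]?).map (fun d => d.erase letter) else st[j]? := by
  induction m with
  | zero =>
    rw [Nat.cast_zero, PySem.List.pyRange_one_eq_nil (le_refl 0), List.foldl_nil]
    exact ⟨rfl, fun j => by simp⟩
  | succ m ih =>
    obtain ⟨hlen, hidx⟩ := ih (by omega)
    have hcast : ((m + 1 : Nat) : Int) = (m : Int) + 1 := by push_cast; ring
    rw [hcast, PySem.List.pyRange_one_succ_right (by positivity), List.foldl_append,
      List.foldl_cons, List.foldl_nil]
    set P := (PySem.List.pyRange 0 (m : Int)).foldl (pvInner letter) st with hP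
    have hmP : m < P.length := by omega
    have hPm : P[m] = st[m]'(by omega) := by
      have := hidx m
      rw [if_neg (by omega)] at this
      have h1 : P[m]? = some P[m] := List.getElem?_eq_getElem hmP
      have h2 : st[m]? = some (st[m]'(by omega)) := List.getElem?_eq_getElem (by omega)
      rw [h1, h2] at this
      exact Option.some_injective _ this
    rw [pvInner_step letter P m hmP]
    constructor
    · rw [List.length_set, hlen]
    · intro j
      rw [List.getElem?_set]
      by_cases hjm : j = m
      · subst hjm
        rw [if_pos rfl, if_pos hmP, if_pos (by omega), hPm,
          List.getElem?_eq_getElem (show j < st.length by omega), Option.map_some]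
      · rw [if_neg (fun h => hjm h.symm), hidx j]
        by_cases hj : j < m
        · rw [if_pos hj, if_pos (by omega)]
        · rw [if_neg hj, if_neg (by omega)]

def pvGraysBelow (g : String) (f : List String) (m : Nat) : List String :=
  ((PySem.List.pyRange 0 (m : Int)).filter (pvGrayB g f)).map (pvLetter g)

lemma pvGraysBelow_succ (g : String) (f : List String) (m : Nat) :
    pvGraysBelow g f (m + 1)
      = pvGraysBelow g f m ++ (if pvGrayB g f (m : Int) = true then [pvLetter g (m : Int)] else []) := by
  rw [pvGraysBelow, pvGraysBelow]
  have hcast : ((m + 1 : Nat) : Int) = (m : Int) + 1 := by push_cast; ring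
  rw [hcast, PySem.List.pyRange_one_succ_right (by positivity), List.filter_append, List.map_append]
  congr 1
  by_cases h : pvGrayB g f (m : Int) = true
  · rw [if_pos h]; simp [List.filter, h]
  · rw [if_neg h]; simp only [Bool.not_eq_true] at h; simp [List.filter, h]

lemma pvEraseList_erase (ws : List String) (d : List String) (x : String) :
    pvEraseList (d.erase x) ws = (pvEraseList d ws).erase x := by
  induction ws generalizing d with
  | nil => rfl
  | cons w ws ih =>
    show pvEraseList ((d.erase x).erase w) ws = (pvEraseList (d.erase w) ws).erase x
    rw [List.erase_comm, ih]

lemma pvEraseList_append_singleton (d ws : List String) (x : String) :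
    pvEraseList d (ws ++ [x]) = (pvEraseList d ws).erase x := by
  rw [pvEraseList, List.foldl_append]; rfl

-- on a duplicate-free list, erasing each w ∈ ws once is the same as filtering ws out
lemma pvEraseList_eq_filter (ws : List String) (d : List String) (hnd : d.Nodup) :
    pvEraseList d ws = d.filter (fun x => !(decide (x ∈ ws))) := by
  induction ws generalizing d with
  | nil => simp [pvEraseList]
  | cons w ws ih =>
    show pvEraseList (d.erase w) ws = _
    rw [hnd.erase_eq_filter w, ih _ (hnd.filter _), List.filter_filter]
    apply List.filter_congr
    intro x _
    by_cases hxw : x = w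
    · subst hxw; simp
    · by_cases hxs : x ∈ ws <;> simp [hxw, hxs]

def pvStepA2 (g : String) (f : List String) (must : PySem.Dict String Int) : List (List String) → Int → List (List String) :=
  fun st i =>
    let letter := pvLetter g i
    if pvFB f i = "GREEN" then
      PySem.List.pySetD st i [letter]
    else if pvFB f i = "YELLOW" then
      let dom := (PySem.List.pyGet? st i).getD []
      if letter ∈ dom then PySem.List.pySetD st i ((PySem.List.remove? dom letter).getD dom) else st
    else if pvFB f i = "GRAY" then
      if ¬ (must.getD letter 0 > 0) then
        (PySem.List.pyRange 0 5).foldl (fun st2 j =>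
          let domj := (PySem.List.pyGet? st2 j).getD []
          if letter ∈ domj then PySem.List.pySetD st2 j ((PySem.List.remove? domj letter).getD domj) else st2) st
      else st
    else st

def pvSpecA (g : String) (f : List String) (m : Nat) (j : Nat) (dom : List String) : List String :=
  if j < m ∧ pvFB f j = "GREEN" then [pvLetter g j]
  else if j < 5 then
    pvEraseList (if j < m ∧ pvFB f j = "YELLOW" then dom.erase (pvLetter g j) else dom) (pvGraysBelow g f m)
  else dom

lemma pvMustA_pos_iff (g : String) (f : List String) (x : String) :
    (pvMustA g f).getD x 0 > 0 ↔ x ∈ pvEffLs g f := by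
  rw [pvMustA_eq, PySem.Dict.getD_counter]
  exact_mod_cast List.count_pos_iff

lemma pvSpecA_eq_of (g : String) (f : List String) (m m' j : Nat) (dom : List String)
    (hG : (j < m ∧ pvFB f j = "GREEN") ↔ (j < m' ∧ pvFB f j = "GREEN"))
    (hY : (j < m ∧ pvFB f j = "YELLOW") ↔ (j < m' ∧ pvFB f j = "YELLOW"))
    (hGr : pvGraysBelow g f m = pvGraysBelow g f m') :
    pvSpecA g f m j dom = pvSpecA g f m' j dom := by
  rw [pvSpecA, pvSpecA, hGr]
  by_cases h1 : j < m' ∧ pvFB f j = "GREEN"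
  · rw [if_pos (hG.2 h1), if_pos h1]
  · rw [if_neg (fun h => h1 (hG.1 h)), if_neg h1]
    by_cases hj5 : j < 5
    · rw [if_pos hj5, if_pos hj5]
      by_cases h2 : j < m' ∧ pvFB f j = "YELLOW"
      · rw [if_pos (hY.2 h2), if_pos h2]
      · rw [if_neg (fun h => h2 (hY.1 h)), if_neg h2]
    · rw [if_neg hj5, if_neg hj5]

set_option maxHeartbeats 2000000 in
lemma pvPassA_inv (g : String) (f : List String) (al : List (List String))
    (h5 : 5 ≤ al.length) (m : Nat) (hm : m ≤ 5) :
    ((PySem.List.pyRange 0 (m : Int)).foldl (pvStepA2 g f (pvMustA g f)) al).length = al.length ∧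
    ∀ j : Nat, ∀ hj : j < al.length,
      ((PySem.List.pyRange 0 (m : Int)).foldl (pvStepA2 g f (pvMustA g f)) al)[j]?
        = some (pvSpecA g f m j al[j]) := by
  induction m with
  | zero =>
    rw [Nat.cast_zero, PySem.List.pyRange_one_eq_nil (le_refl 0), List.foldl_nil]
    refine ⟨rfl, fun j hj => ?_⟩
    rw [List.getElem?_eq_getElem hj]
    congr 1
    rw [pvSpecA, if_neg (by omega), pvGraysBelow, Nat.cast_zero,
      PySem.List.pyRange_one_eq_nil (le_refl 0)]
    by_cases hj5 : j < 5
    · rw [if_pos hj5, if_neg (by omega)]; rfl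
    · rw [if_neg hj5]
  | succ m ih =>
    obtain ⟨hlen, hidx⟩ := ih (by omega)
    have hcast : ((m + 1 : Nat) : Int) = (m : Int) + 1 := by push_cast; ring
    rw [hcast, PySem.List.pyRange_one_succ_right (by positivity), List.foldl_append,
      List.foldl_cons, List.foldl_nil]
    set P := (PySem.List.pyRange 0 (m : Int)).foldl (pvStepA2 g f (pvMustA g f)) al with hP
    have hPval : ∀ j : Nat, ∀ hj : j < al.length, j < P.length ∧ P[j]'(by omega) = pvSpecA g f m j al[j] := by
      intro j hj
      refine ⟨by omega, ?_⟩
      have := hidx j hj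
      rw [List.getElem?_eq_getElem (show j < P.length by omega)] at this
      exact Option.some_injective _ this
    by_cases hG : pvFB f (m : Int) = "GREEN"
    · have hmal : m < al.length := by omega
      have hstep : pvStepA2 g f (pvMustA g f) P (m : Int) = P.set m [pvLetter g (m : Int)] := by
        rw [pvStepA2]
        simp only [hG, if_pos]
        rw [PySem.List.pySetD, PySem.List.pySet?_natCast _ _ _ (by omega), Option.getD_some]
      rw [hstep]
      have hgb : pvGrayB g f (m : Int) = false := by
        simp only [pvGrayB, decide_eq_false_iff_not]
        rintro ⟨h1, -⟩; rw [hG] at h1; exact absurd h1 (by decide)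
      have hgrays : pvGraysBelow g f (m + 1) = pvGraysBelow g f m := by
        rw [pvGraysBelow_succ, hgb]; simp
      refine ⟨by rw [List.length_set]; exact hlen, fun j hj => ?_⟩
      rw [List.getElem?_set]
      by_cases hjm : j = m
      · subst hjm
        rw [if_pos rfl, if_pos (by omega)]
        congr 1
        rw [pvSpecA, if_pos ⟨by omega, hG⟩]
      · rw [if_neg (fun h => hjm h.symm), hidx j hj]
        congr 1
        exact pvSpecA_eq_of g f m (m+1) j _
          (⟨fun ⟨h1,h2⟩ => ⟨by omega, h2⟩, fun ⟨h1,h2⟩ => ⟨by omega, h2⟩⟩)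
          (⟨fun ⟨h1,h2⟩ => ⟨by omega, h2⟩, fun ⟨h1,h2⟩ => ⟨by omega, h2⟩⟩)
          hgrays.symm
    · have hspec_same : pvGrayB g f (m : Int) = false → ¬ pvFB f (m : Int) = "YELLOW" →
          ∀ j : Nat, ∀ hj : j < al.length, pvSpecA g f m j (al[j]'hj) = pvSpecA g f (m+1) j (al[j]'hj) := by
        intro hgb hny j hj
        apply pvSpecA_eq_of
        · constructor
          · rintro ⟨h1, h2⟩; exact ⟨by omega, h2⟩
          · rintro ⟨h1, h2⟩
            refine ⟨?_, h2⟩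
            rcases Nat.lt_succ_iff_lt_or_eq.1 h1 with h | h
            · exact h
            · subst h; exact absurd h2 hG
        · constructor
          · rintro ⟨h1, h2⟩; exact ⟨by omega, h2⟩
          · rintro ⟨h1, h2⟩
            refine ⟨?_, h2⟩
            rcases Nat.lt_succ_iff_lt_or_eq.1 h1 with h | h
            · exact h
            · subst h; exact absurd h2 hny
        · rw [pvGraysBelow_succ, hgb]; simp
      by_cases hY : pvFB f (m : Int) = "YELLOW"
      · have hmal : m < al.length := by omega
        have hstep : pvStepA2 g f (pvMustA g f) P (m : Int) = pvInner (pvLetter g (m : Int)) P (m : Int) := by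
          simp only [pvStepA2]
          rw [if_neg hG, if_pos hY]
          rfl
        rw [hstep, pvInner_step _ _ _ (show m < P.length by omega)]
        have hgb : pvGrayB g f (m : Int) = false := by
          simp only [pvGrayB, decide_eq_false_iff_not]
          rintro ⟨h1, -⟩; rw [hY] at h1; exact absurd h1 (by decide)
        have hgrays : pvGraysBelow g f (m + 1) = pvGraysBelow g f m := by
          rw [pvGraysBelow_succ, hgb]; simp
        refine ⟨by rw [List.length_set]; exact hlen, fun j hj => ?_⟩
        rw [List.getElem?_set]
        by_cases hjm : j = m
        · subst hjm
          rw [if_pos rfl, if_pos (by omega)]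
          congr 1
          have e1 : pvSpecA g f j j (al[j]'hj) = pvEraseList (al[j]'hj) (pvGraysBelow g f j) := by
            rw [pvSpecA, if_neg (fun h => absurd h.1 (by omega)), if_pos (by omega),
              if_neg (fun h => absurd h.1 (by omega))]
          have e2 : pvSpecA g f (j+1) j (al[j]'hj)
              = pvEraseList ((al[j]'hj).erase (pvLetter g (j : Int))) (pvGraysBelow g f (j+1)) := by
            rw [pvSpecA, if_neg (fun h => hG h.2), if_pos (by omega), if_pos ⟨by omega, hY⟩]
          rw [(hPval j hj).2, e1, e2, hgrays]
          exact (pvEraseList_erase _ _ _).symm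
        · rw [if_neg (fun h => hjm h.symm), hidx j hj]
          congr 1
          exact pvSpecA_eq_of g f m (m+1) j _
            (⟨fun ⟨h1,h2⟩ => ⟨by omega, h2⟩, fun ⟨h1,h2⟩ => ⟨by omega, h2⟩⟩)
            (⟨fun ⟨h1,h2⟩ => ⟨by omega, h2⟩, fun ⟨h1,h2⟩ => ⟨by omega, h2⟩⟩)
            hgrays.symm
      · by_cases hGr : pvFB f (m : Int) = "GRAY"
        · by_cases hreq : (pvMustA g f).getD (pvLetter g (m : Int)) 0 > 0
          · have hgb : pvGrayB g f (m : Int) = false := by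
              simp only [pvGrayB, decide_eq_false_iff_not]
              rintro ⟨-, h2⟩; exact h2 ((pvMustA_pos_iff g f _).1 hreq)
            have hstep : pvStepA2 g f (pvMustA g f) P (m : Int) = P := by
              simp only [pvStepA2]
              rw [if_neg hG, if_neg hY, if_pos hGr, if_neg (by simpa using hreq)]
            rw [hstep]
            exact ⟨hlen, fun j hj => by
              rw [hidx j hj]; exact congrArg some (hspec_same hgb hY j hj)⟩
          · have hnotmem : pvLetter g (m : Int) ∉ pvEffLs g f :=
              fun h => hreq ((pvMustA_pos_iff g f _).2 h)
            have h5al : 5 ≤ al.length := h5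
            have hgb : pvGrayB g f (m : Int) = true := by
              simp only [pvGrayB, decide_eq_true_eq]
              exact ⟨hGr, hnotmem⟩
            have hgrays : pvGraysBelow g f (m + 1) = pvGraysBelow g f m ++ [pvLetter g (m : Int)] := by
              rw [pvGraysBelow_succ, hgb]; simp
            have hstep : pvStepA2 g f (pvMustA g f) P (m : Int)
                = (PySem.List.pyRange 0 5).foldl (pvInner (pvLetter g (m : Int))) P := by
              simp only [pvStepA2]
              rw [if_neg hG, if_neg hY, if_pos hGr, if_pos hreq]
              rfl
            rw [hstep]
            obtain ⟨hlen2, hidx2⟩ := pvGrayInner (pvLetter g (m : Int)) 5 (le_refl 5) P (by omega)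
            have hc5 : ((5 : Nat) : Int) = (5 : Int) := by norm_num
            rw [hc5] at hlen2 hidx2
            refine ⟨by rw [hlen2, hlen], fun j hj => ?_⟩
            rw [hidx2 j]
            by_cases hj5 : j < 5
            · rw [if_pos hj5, hidx j hj, Option.map_some]
              refine congrArg some ?_
              rw [pvSpecA, pvSpecA]
              by_cases hjg : j < m ∧ pvFB f (j : Int) = "GREEN"
              · rw [if_pos hjg, if_pos ⟨by omega, hjg.2⟩]
                apply List.erase_of_not_mem
                intro hmem
                rw [List.mem_singleton] at hmem
                have hjin : pvLetter g (j : Int) ∈ pvEffLs g f :=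
                  (pvMem_effLs g f _).2 ⟨j, by omega, rfl, Or.inl hjg.2⟩
                exact hnotmem (by rw [hmem]; exact hjin)
              · have hjg' : ¬(j < m + 1 ∧ pvFB f (j : Int) = "GREEN") := by
                  rintro ⟨h1, h2⟩
                  rcases Nat.lt_succ_iff_lt_or_eq.1 h1 with h | h
                  · exact hjg ⟨h, h2⟩
                  · subst h; exact hG h2
                rw [if_neg hjg, if_neg hjg', if_pos hj5, if_pos hj5, hgrays,
                  pvEraseList_append_singleton]
                refine congrArg (fun l : List String => l.erase (pvLetter g (m : Int))) ?_
                refine congrArg (fun d => pvEraseList d (pvGraysBelow g f m)) ?_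
                by_cases hjy : j < m ∧ pvFB f (j : Int) = "YELLOW"
                · rw [if_pos hjy, if_pos ⟨by omega, hjy.2⟩]
                · have hjy' : ¬(j < m + 1 ∧ pvFB f (j : Int) = "YELLOW") := by
                    rintro ⟨h1, h2⟩
                    rcases Nat.lt_succ_iff_lt_or_eq.1 h1 with h | h
                    · exact hjy ⟨h, h2⟩
                    · subst h; exact hY h2
                  rw [if_neg hjy, if_neg hjy']
            · rw [if_neg hj5, hidx j hj]
              refine congrArg some ?_
              rw [pvSpecA, pvSpecA, if_neg (fun h => hj5 (by omega)), if_neg hj5,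
                if_neg (fun h => hj5 (by omega)), if_neg hj5]
        · have hgb : pvGrayB g f (m : Int) = false := by
            simp only [pvGrayB, decide_eq_false_iff_not]
            rintro ⟨h1, -⟩; exact hGr h1
          have hstep : pvStepA2 g f (pvMustA g f) P (m : Int) = P := by
            simp only [pvStepA2]
            rw [if_neg hG, if_neg hY, if_neg hGr]
          rw [hstep]
          exact ⟨hlen, fun j hj => by
            rw [hidx j hj]; exact congrArg some (hspec_same hgb hY j hj)⟩

-- B's second loop and its per-position specification
def pvBannedB (g : String) (f : List String) (j : Nat) : PySem.Set String :=
  if pvFB f j = "YELLOW" then PySem.Set.union (pvForbS g f) [pvLetter g j] else pvForbS g f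

def pvSpecB (g : String) (f : List String) (j : Nat) (dom : List String) : List String :=
  if pvFB f j = "GREEN" then [pvLetter g j]
  else dom.filter (fun x => !(PySem.Set.contains (pvBannedB g f j) x))

def pvStepB (g : String) (f : List String) : List (List String) → Int → List (List String) :=
  fun st i =>
    if pvFB f i = "GREEN" then
      PySem.List.pySetD st i [pvLetter g i]
    else
      let banned : PySem.Set String :=
        if pvFB f i = "YELLOW" then PySem.Set.union (pvForbS g f) [pvLetter g i] else pvForbS g f
      PySem.List.pySetD st i
        (((PySem.List.pyGet? st i).getD []).filter (fun x => !(PySem.Set.contains banned x)))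

lemma pvPassB_inv (g : String) (f : List String) (al : List (List String))
    (h5 : 5 ≤ al.length) (m : Nat) (hm : m ≤ 5) :
    ((PySem.List.pyRange 0 (m : Int)).foldl (pvStepB g f) al).length = al.length ∧
    ∀ j : Nat, ((PySem.List.pyRange 0 (m : Int)).foldl (pvStepB g f) al)[j]?
      = if j < m then (al[j]?).map (pvSpecB g f j) else al[j]? := by
  induction m with
  | zero =>
    rw [Nat.cast_zero, PySem.List.pyRange_one_eq_nil (le_refl 0), List.foldl_nil]
    exact ⟨rfl, fun j => by simp⟩
  | succ m ih =>
    obtain ⟨hlen, hidx⟩ := ih (by omega)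
    have hcast : ((m + 1 : Nat) : Int) = (m : Int) + 1 := by push_cast; ring
    rw [hcast, PySem.List.pyRange_one_succ_right (by positivity), List.foldl_append,
      List.foldl_cons, List.foldl_nil]
    set P := (PySem.List.pyRange 0 (m : Int)).foldl (pvStepB g f) al with hP
    have hmP : m < P.length := by omega
    have hPm : P[m] = al[m]'(by omega) := by
      have := hidx m
      rw [if_neg (by omega)] at this
      have h1 : P[m]? = some P[m] := List.getElem?_eq_getElem hmP
      have h2 : al[m]? = some (al[m]'(by omega)) := List.getElem?_eq_getElem (by omega)
      rw [h1, h2] at this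
      exact Option.some_injective _ this
    have hstep : pvStepB g f P (m : Int) = P.set m (pvSpecB g f m P[m]) := by
      rw [pvStepB, pvSpecB]
      by_cases hG : pvFB f (m : Int) = "GREEN"
      · rw [if_pos hG, if_pos hG, PySem.List.pySetD_natCast]
      · rw [if_neg hG, if_neg hG]
        simp only [PySem.List.pyGet?_natCast, List.getElem?_eq_getElem hmP, Option.getD_some,
          PySem.List.pySetD_natCast, pvBannedB]
    rw [hstep]
    refine ⟨by rw [List.length_set, hlen], fun j => ?_⟩
    rw [List.getElem?_set]
    by_cases hjm : j = m
    · subst hjm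
      rw [if_pos rfl, if_pos hmP, if_pos (by omega), hPm,
        List.getElem?_eq_getElem (show j < al.length by omega), Option.map_some]
    · rw [if_neg (fun h => hjm h.symm), hidx j]
      by_cases hj : j < m
      · rw [if_pos hj, if_pos (by omega)]
      · rw [if_neg hj, if_neg (by omega)]

lemma pvGraysBelow_five (g : String) (f : List String) : pvGraysBelow g f 5 = pvGrays g f := by
  rw [pvGraysBelow, pvGrays]
  norm_num

-- per-position agreement of the two specifications, on a duplicate-free domain
lemma pvSpec_agree (g : String) (f : List String) (j : Nat) (hj : j < 5)
    (dom : List String) (hnd : dom.Nodup) :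
    pvSpecA g f 5 j dom = pvSpecB g f j dom := by
  rw [pvSpecA, pvSpecB, pvGraysBelow_five]
  by_cases hG : pvFB f (j : Int) = "GREEN"
  · rw [if_pos ⟨hj, hG⟩, if_pos hG]
  · rw [if_neg (fun h => hG h.2), if_neg hG, if_pos hj]
    have hmem : ∀ x : String, PySem.Set.contains (pvBannedB g f j) x = true ↔
        (x ∈ pvGrays g f ∨ (pvFB f (j : Int) = "YELLOW" ∧ x = pvLetter g (j : Int))) := by
      intro x
      rw [PySem.Set.contains_iff, pvBannedB]
      by_cases hY : pvFB f (j : Int) = "YELLOW"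
      · rw [if_pos hY, PySem.Set.mem_union, pvForbS_eq, PySem.Set.mem_ofList]
        simp [hY]
      · rw [if_neg hY, pvForbS_eq, PySem.Set.mem_ofList]
        simp [hY]
    by_cases hY : pvFB f (j : Int) = "YELLOW"
    · rw [if_pos ⟨hj, hY⟩, hnd.erase_eq_filter,
        pvEraseList_eq_filter _ _ (hnd.filter _), List.filter_filter]
      apply List.filter_congr
      intro x _
      have := hmem x
      by_cases h1 : x = pvLetter g (j : Int) <;> by_cases h2 : x ∈ pvGrays g f <;>
        simp [h1, h2, hY] at this ⊢ <;> simp [this, h1]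
    · rw [if_neg (fun h => hY h.2), pvEraseList_eq_filter _ _ hnd]
      apply List.filter_congr
      intro x _
      have := hmem x
      by_cases h2 : x ∈ pvGrays g f <;> simp [h2, hY] at this ⊢ <;> simp [this]

lemma portA_eq (al : List (List String)) (g : String) (f : List String) :
    update_csp_domains al g f =
      ((PySem.List.pyRange 0 5).foldl (pvStepA2 g f (pvMustA g f)) al, (pvMustA g f).items) := rfl

lemma portB_eq (al : List (List String)) (g : String) (f : List String) :
    update_csp_domains_alt al g f =
      ((PySem.List.pyRange 0 5).foldl (pvStepB g f) al, (pvMustB g f).items) := rfl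

theorem update_csp_domains_main (al : List (List String)) (g : String) (f : List String)
    (hpre : Pre_update_csp_domains al g f) :
    update_csp_domains al g f = update_csp_domains_alt al g f := by
  obtain ⟨-, -, h5, hnd⟩ := hpre
  rw [portA_eq, portB_eq, Prod.mk.injEq]
  refine ⟨?_, by rw [pvMustA_eq, pvMustB_eq]⟩
  obtain ⟨hlenA, hidxA⟩ := pvPassA_inv g f al h5 5 (le_refl 5)
  obtain ⟨hlenB, hidxB⟩ := pvPassB_inv g f al h5 5 (le_refl 5)
  have hc5 : ((5 : Nat) : Int) = (5 : Int) := by norm_num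
  rw [hc5] at hlenA hidxA hlenB hidxB
  apply List.ext_getElem?
  intro j
  rw [hidxB j]
  by_cases hj : j < al.length
  · rw [hidxA j hj]
    by_cases hj5 : j < 5
    · rw [if_pos hj5, List.getElem?_eq_getElem hj, Option.map_some]
      refine congrArg some ?_
      have hndj : (al[j]'hj).Nodup := by
        have := hnd j hj5
        rwa [List.getElem?_eq_getElem hj, Option.getD_some] at this
      exact pvSpec_agree g f j hj5 _ hndj
    · rw [if_neg hj5]
      refine (congrArg some ?_).trans (List.getElem?_eq_getElem hj).symm
      rw [pvSpecA, if_neg (fun h => hj5 (by omega)), if_neg hj5]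
  · rw [if_neg (by omega), List.getElem?_eq_none (by omega), List.getElem?_eq_none (by omega)]

-- ===== VERDICT (by name: the statement is the Claim_ definition above) =====
theorem update_csp_domains_spec : Claim_equal_update_csp_domains := by
  intro allowed_letters guess feedback _ hpre
  unfold Spec_update_csp_domains
  exact update_csp_domains_main allowed_letters guess feedback hpre
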